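-- pv_equiv track=rewrite | github.com/exeSpeak/exeBlank | handler_items.py | returnIntArrayFromItemString
-- ===== SOURCE A (Python) =====
-- def returnIntFromItemCode (input_itemCode):
-- 	first_letter = ord(input_itemCode[0]) - ord('A')
-- 	second_letter = ord(input_itemCode[1]) - ord('A')
-- 	return (first_letter * 26) + second_letter
--
-- def returnIntArrayFromItemString (input_itemString):
--     result = []
--     # Process string in pairs of 2 characters
--     for i in range(0, len(input_itemString), 2):
--         if i + 1 < len(input_itemString):  # Ensure we have 2 characters
--             code = input_itemString[i:i+2]
--             num = returnIntFromItemCode(code)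
--             result.append(num)
--     return result
-- ===== SOURCE B (Python) =====
-- def returnIntArrayFromItemString(input_itemString):
--     # One pass character by character with a pending state: hold the first
--     # letter of a pair; when the second arrives, emit its code and reset.
--     result = []
--     pending = None
--     for ch in input_itemString:
--         if pending is None:
--             pending = ch
--         else:
--             result.append((ord(pending) - 65) * 26 + (ord(ch) - 65))
--             pending = None
--     return result
-- ===== Notes on version B (the rewrite author's own statement) =====
-- stated objective: alternative
-- what changed: Replaced the index-stepping loop (stride-2 range, i+1<len bounds guard, per-pair slicing and a helper) by a single character-by-character state machine that holds a pending first letter and emits a code when the second letter of each pair arrives; an unpaired trailing character is simply left pending, which replaces the bounds guard.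
import Mathlib
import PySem

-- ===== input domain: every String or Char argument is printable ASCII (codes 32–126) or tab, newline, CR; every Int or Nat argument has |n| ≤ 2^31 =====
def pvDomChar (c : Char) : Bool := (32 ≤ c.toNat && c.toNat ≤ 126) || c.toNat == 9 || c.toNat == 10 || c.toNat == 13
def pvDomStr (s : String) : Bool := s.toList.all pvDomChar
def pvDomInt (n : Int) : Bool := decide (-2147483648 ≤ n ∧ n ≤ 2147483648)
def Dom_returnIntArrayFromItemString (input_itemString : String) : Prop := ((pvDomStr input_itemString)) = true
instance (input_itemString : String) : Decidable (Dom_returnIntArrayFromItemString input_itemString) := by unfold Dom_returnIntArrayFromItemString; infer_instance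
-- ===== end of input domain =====

-- B replaces A's index-stepping loop (stride-2 range, i+1 < len guard, per-pair slice and helper)
-- by a single character-by-character state machine holding a pending first letter — alternative
-- decomposition, same O(n) cost; equal on all strings.

-- ===== PORT A =====
-- helper: ord(code[0]) / ord(code[1]); none = IndexError (unreachable under A's length guard)
def returnIntFromItemCode (code : List Char) : Option Int :=
  match PySem.List.pyGet? code 0, PySem.List.pyGet? code 1 with
  | some c0, some c1 => some (((c0.toNat : Int) - 65) * 26 + ((c1.toNat : Int) - 65))
  | _, _ => none

def returnIntArrayFromItemString (input_itemString : String) : List Int :=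
  let cs := input_itemString.toList
  let n : Int := (cs.length : Int)
  (PySem.List.pyRange 0 n 2).foldl
    (fun result i =>
      if i + 1 < n then
        match returnIntFromItemCode (PySem.List.slice cs (some i) (some (i + 2))) with
        | some num => result ++ [num]
        | none => result   -- unreachable: the guard ensures the slice has two characters
      else result) []

-- ===== PORT B =====
-- state machine: state = (result so far, pending first letter of the current pair)
def returnIntArrayFromItemString_alt (input_itemString : String) : List Int :=
  (input_itemString.toList.foldl
    (fun st ch =>
      match st.2 with
      | none => (st.1, some ch)
      | some p => (st.1 ++ [((p.toNat : Int) - 65) * 26 + ((ch.toNat : Int) - 65)], none))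
    (([] : List Int), (none : Option Char))).1

-- ===== PRECONDITION & SPEC =====
def Spec_returnIntArrayFromItemString (input_itemString : String) (out : List Int) : Prop := out = returnIntArrayFromItemString_alt input_itemString
instance (input_itemString : String) (out : List Int) : Decidable (Spec_returnIntArrayFromItemString input_itemString out) := by unfold Spec_returnIntArrayFromItemString; infer_instance

-- ===== CLAIM (what is proved, stated in full; the proofs are below) =====
def Claim_equal_returnIntArrayFromItemString : Prop := ∀ (input_itemString : String), Dom_returnIntArrayFromItemString input_itemString → Spec_returnIntArrayFromItemString input_itemString (returnIntArrayFromItemString input_itemString)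

-- ===== LEMMAS AND PROOFS =====

/-- the common specification: code consecutive character pairs, drop an unpaired last one -/
def pvPairs : List Char → List Int
  | a :: b :: t => (((a.toNat : Int) - 65) * 26 + ((b.toNat : Int) - 65)) :: pvPairs t
  | _ => []

lemma pyRange_two_nil (j n : Int) (h : n ≤ j) : PySem.List.pyRange j n 2 = [] := by
  simp [PySem.List.pyRange]; omega

lemma pyRange_two_cons (j n : Int) (h : j < n) :
    PySem.List.pyRange j n 2 = j :: PySem.List.pyRange (j + 2) n 2 := by
  simp only [PySem.List.pyRange, if_neg (by norm_num : (2:Int) ≠ 0)]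
  norm_num
  rw [if_pos h]
  have hc : ((n - j + 2 - 1) / 2).toNat
      = (if j + 2 < n then ((n - (j+2) + 2 - 1) / 2).toNat else 0) + 1 := by
    split_ifs <;> omega
  rw [hc, List.range_succ_eq_map]
  simp [List.map_map, Function.comp]
  intro a _
  ring

lemma A_loop (cs : List Char) (m : Nat) : ∀ (j : Nat), cs.length - j ≤ m → ∀ (acc : List Int),
    (PySem.List.pyRange (j : Int) (cs.length : Int) 2).foldl
      (fun result i =>
        if i + 1 < (cs.length : Int) then
          match returnIntFromItemCode (PySem.List.slice cs (some i) (some (i + 2))) with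
          | some num => result ++ [num]
          | none => result
        else result) acc = acc ++ pvPairs (cs.drop j) := by
  induction m with
  | zero =>
    intro j hj acc
    rw [pyRange_two_nil _ _ (by exact_mod_cast (by omega : cs.length ≤ j))]
    rw [List.drop_eq_nil_of_le (by omega)]
    simp [pvPairs]
  | succ m ih =>
    intro j hj acc
    by_cases hlt : j < cs.length
    · rw [pyRange_two_cons _ _ (by exact_mod_cast hlt)]
      rw [List.foldl_cons]
      by_cases h2 : j + 1 < cs.length
      · rw [if_pos (by exact_mod_cast h2)]
        have hdrop : cs.drop j = cs[j] :: cs[j+1] :: cs.drop (j+2) := by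
          rw [List.drop_eq_getElem_cons hlt, List.drop_eq_getElem_cons h2]
        have hslice : PySem.List.slice cs (some (j:Int)) (some ((j:Int) + 2)) = [cs[j], cs[j+1]] := by
          have h := PySem.List.slice_natCast_add cs j 2
          push_cast at h
          rw [h, hdrop]
          rfl
        rw [hslice]
        have hcode : returnIntFromItemCode [cs[j], cs[j+1]]
            = some (((cs[j].toNat : Int) - 65) * 26 + ((cs[j+1].toNat : Int) - 65)) := by
          simp [returnIntFromItemCode, PySem.List.pyGet?, PySem.List.pyIdx?]
        rw [hcode]
        have : ((j:Int) + 2) = ((j + 2 : Nat) : Int) := by push_cast; ring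
        rw [this, ih (j+2) (by omega)]
        rw [hdrop]
        simp [pvPairs]
      · rw [if_neg (by exact_mod_cast h2)]
        have : ((j:Int) + 2) = ((j + 2 : Nat) : Int) := by push_cast; ring
        rw [this, pyRange_two_nil _ _ (by exact_mod_cast (by omega : cs.length ≤ j + 2))]
        have h1 : (cs.drop j).length = 1 := by simp; omega
        obtain ⟨a, ha⟩ := List.length_eq_one_iff.mp h1
        rw [ha]
        simp [pvPairs]
    · rw [pyRange_two_nil _ _ (by exact_mod_cast (by omega : cs.length ≤ j))]
      rw [List.drop_eq_nil_of_le (by omega)]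
      simp [pvPairs]

/-- B's state machine, started with no pending character, produces exactly the pair codes. -/
lemma B_loop (cs : List Char) : ∀ (acc : List Int),
    (cs.foldl
      (fun st ch =>
        match st.2 with
        | none => (st.1, some ch)
        | some p => (st.1 ++ [((p.toNat : Int) - 65) * 26 + ((ch.toNat : Int) - 65)], none))
      (acc, (none : Option Char))).1 = acc ++ pvPairs cs := by
  induction cs using pvPairs.induct with
  | case1 a b t ih =>
    intro acc
    simp only [List.foldl_cons]
    rw [ih]
    simp [pvPairs]
  | case2 x h =>
    intro acc
    match x with
    | [] => simp [pvPairs]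
    | [a] => simp [pvPairs]
    | a :: b :: t => exact absurd rfl (h a b t)

-- ===== VERDICT (by name: the statement is the Claim_ definition above) =====
theorem returnIntArrayFromItemString_spec : Claim_equal_returnIntArrayFromItemString := by
  intro s _
  unfold Spec_returnIntArrayFromItemString returnIntArrayFromItemString returnIntArrayFromItemString_alt
  rw [B_loop s.toList []]
  simpa using A_loop s.toList s.toList.length 0 (by omega) []
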